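-- pv_equiv track=rewrite | github.com/bob686868/Leetcode-100-day-challenge- | day27.py | houseRobber4
-- ===== SOURCE A (Python) =====
-- def houseRobber4(nums,k):
--     l,r=0,10**9
--     res=10**9
--
--
--     while l<=r:
--         m=(l+r)//2
--         taken=0
--
--         canTake=True
--         for n in nums:
--             if n<=m and canTake:
--                 taken+=1
--                 canTake=False
--             else:
--                 canTake=True
--
--         if taken>=k:
--             r=m-1
--             res=m
--         else:
--             l=m+1
--     return res
-- ===== SOURCE B (Python) =====
-- def _feasible(nums, k, m):
--     prev2 = prev1 = 0
--     for n in nums: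
--         prev2, prev1 = prev1, (max(prev1, prev2 + 1) if n <= m else prev1)
--     return prev1 >= k
--
-- def houseRobber4(nums, k):
--     lo, hi = 0, 10**9 + 1
--     while lo < hi:
--         mid = (lo + hi) // 2
--         if _feasible(nums, k, mid):
--             hi = mid
--         else:
--             lo = mid + 1
--     return min(lo, 10**9)
-- ===== Notes on version B (the rewrite author's own statement) =====
-- stated objective: alternative
-- what changed: A's closed-interval binary search carrying l/r/res with an inline greedy canTake-flag scan is replaced by a half-open bisect over [0, 10**9+1) whose feasibility test is a separate rolling two-variable DP helper computing the maximum number of non-adjacent houses with value <= m; the final lo is clamped with min(lo, 10**9), which reproduces A's default result on infeasible inputs.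
import Mathlib
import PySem

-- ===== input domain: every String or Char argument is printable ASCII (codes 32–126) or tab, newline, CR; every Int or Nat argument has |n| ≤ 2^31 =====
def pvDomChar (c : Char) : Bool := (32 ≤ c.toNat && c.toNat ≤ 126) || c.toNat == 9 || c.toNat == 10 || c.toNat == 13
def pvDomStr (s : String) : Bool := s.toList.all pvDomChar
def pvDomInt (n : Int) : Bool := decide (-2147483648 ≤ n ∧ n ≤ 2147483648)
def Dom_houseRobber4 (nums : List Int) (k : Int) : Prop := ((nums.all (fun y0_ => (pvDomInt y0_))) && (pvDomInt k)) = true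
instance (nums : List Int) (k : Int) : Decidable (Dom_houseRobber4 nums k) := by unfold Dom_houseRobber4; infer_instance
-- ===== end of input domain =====

-- B replaces A's closed-interval binary search (l/r/res state with an inline greedy
-- canTake-flag scan) by a half-open bisect over [0, 10^9+1) whose feasibility test is a
-- separate rolling two-variable DP helper counting the maximum number of non-adjacent
-- houses with value ≤ m (alternative decomposition, same asymptotic cost).

-- ===== PORT A =====
-- inner for-loop of A: state (taken, canTake)
def pvGreedyStep (m : Int) (s : Int × Bool) (n : Int) : Int × Bool :=
  if n ≤ m ∧ s.2 then (s.1 + 1, false) else (s.1, true)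

-- A's while-loop; the Nat fuel (= size of the interval [l, r], which shrinks every
-- iteration) only makes the recursion structural and is never exhausted while l ≤ r
def houseRobber4_go (nums : List Int) (k : Int) : Nat → Int → Int → Int → Int
  | 0, _, _, res => res
  | fuel + 1, l, r, res =>
    if l ≤ r then
      let m := PySem.Int.floordiv (l + r) 2
      let taken := (nums.foldl (pvGreedyStep m) (0, true)).1
      if taken ≥ k then houseRobber4_go nums k fuel l (m - 1) m
      else houseRobber4_go nums k fuel (m + 1) r res
    else res

def houseRobber4 (nums : List Int) (k : Int) : Int :=
  houseRobber4_go nums k 1000000001 0 1000000000 1000000000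

-- ===== PORT B =====
-- B's _feasible helper: for-loop over nums ported as structural recursion on the list
def pvDpCount (m : Int) : List Int → Int → Int → Int
  | [], _, prev1 => prev1
  | n :: t, prev2, prev1 => pvDpCount m t prev1 (if n ≤ m then max prev1 (prev2 + 1) else prev1)

def pvFeasible (nums : List Int) (k m : Int) : Bool := pvDpCount m nums 0 0 ≥ k

-- midpoint bounds, cited by the port's decreasing_by
theorem pvMid_bounds (lo hi : Int) (h : lo < hi) :
    lo ≤ PySem.Int.floordiv (lo + hi) 2 ∧ PySem.Int.floordiv (lo + hi) 2 < hi := by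
  have h1 := PySem.Int.floordiv_two_mid_bounds (lo := lo) (hi := hi) (le_of_lt h)
  have h2 : PySem.Int.floordiv (lo + hi) 2 < hi := by
    rw [PySem.Int.floordiv_lt_iff_lt_mul (by omega)]
    omega
  exact ⟨h1.1, h2⟩

-- B's while-loop: half-open bisect, recursion on the interval width
def houseRobber4_alt_go (nums : List Int) (k : Int) (lo hi : Int) : Int :=
  if h : lo < hi then
    if pvFeasible nums k (PySem.Int.floordiv (lo + hi) 2) then
      houseRobber4_alt_go nums k lo (PySem.Int.floordiv (lo + hi) 2)
    else
      houseRobber4_alt_go nums k (PySem.Int.floordiv (lo + hi) 2 + 1) hi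
  else lo
termination_by (hi - lo).toNat
decreasing_by
  · have := pvMid_bounds lo hi h; omega
  · have := pvMid_bounds lo hi h; omega

def houseRobber4_alt (nums : List Int) (k : Int) : Int :=
  min (houseRobber4_alt_go nums k 0 1000000001) 1000000000

-- ===== PRECONDITION & SPEC =====
def Spec_houseRobber4 (nums : List Int) (k : Int) (out : Int) : Prop := out = houseRobber4_alt nums k
instance (nums : List Int) (k : Int) (out : Int) : Decidable (Spec_houseRobber4 nums k out) := by unfold Spec_houseRobber4; infer_instance

-- ===== CLAIM (what is proved, stated in full; the proofs are below) =====
def Claim_equal_houseRobber4 : Prop := ∀ (nums : List Int) (k : Int), Dom_houseRobber4 nums k → Spec_houseRobber4 nums k (houseRobber4 nums k)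

-- ===== LEMMAS AND PROOFS =====

-- the greedy scan and the DP compute the same count
lemma pvCount_inv (m : Int) (nums : List Int) : ∀ (taken : Int) (c : Bool),
    (nums.foldl (pvGreedyStep m) (taken, c)).1 =
    pvDpCount m nums (if c then taken else taken - 1) taken := by
  induction nums with
  | nil => intro taken c; simp [pvDpCount]
  | cons n t ih =>
      intro taken c
      cases c
      · have hg : pvGreedyStep m (taken, false) n = (taken, true) := by simp [pvGreedyStep]
        have hd : (if n ≤ m then max taken (taken - 1 + 1) else taken) = taken := by
          split_ifs <;> omega
        simp only [List.foldl_cons, hg, pvDpCount, if_neg Bool.false_ne_true, hd]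
        simpa using ih taken true
      · by_cases hn : n ≤ m
        · have hg : pvGreedyStep m (taken, true) n = (taken + 1, false) := by
            simp [pvGreedyStep, hn]
          have hd : (if n ≤ m then max taken (taken + 1) else taken) = taken + 1 := by
            rw [if_pos hn]; omega
          simp only [List.foldl_cons, hg, pvDpCount, if_pos, hd]
          have := ih (taken + 1) false
          simpa [show taken + 1 - 1 = taken by omega] using this
        · have hg : pvGreedyStep m (taken, true) n = (taken, true) := by
            simp [pvGreedyStep, hn]
          simp only [List.foldl_cons, hg, pvDpCount, if_neg hn]
          simpa using ih taken true

lemma pvCount_eq (m : Int) (nums : List Int) :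
    (nums.foldl (pvGreedyStep m) (0, true)).1 = pvDpCount m nums 0 0 := by
  simpa using pvCount_inv m nums 0 true

-- DP count is monotone in the threshold (and in the carried state)
lemma pvDpCount_mono (t : List Int) : ∀ (m m' p2 p2' p1 p1' : Int),
    m ≤ m' → p2 ≤ p2' → p1 ≤ p1' → pvDpCount m t p2 p1 ≤ pvDpCount m' t p2' p1' := by
  induction t with
  | nil => intro _ _ _ _ _ _ _ _ h1; simpa [pvDpCount] using h1
  | cons n t ih =>
      intro m m' p2 p2' p1 p1' hm h2 h1
      simp only [pvDpCount]
      refine ih m m' p1 p1' _ _ hm h1 ?_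
      by_cases hn : n ≤ m <;> by_cases hn' : n ≤ m' <;> simp [hn, hn'] <;> omega

lemma pvFeasible_mono (nums : List Int) (k m m' : Int) (hm : m ≤ m')
    (h : pvFeasible nums k m = true) : pvFeasible nums k m' = true := by
  simp only [pvFeasible, ge_iff_le, decide_eq_true_eq] at h ⊢
  exact le_trans h (pvDpCount_mono nums m m' 0 0 0 0 hm le_rfl le_rfl)

-- A's loop when no feasible threshold in [lo0, r] exists: returns res
lemma pvA_none (nums : List Int) (k lo0 : Int) : ∀ (fuel : Nat) (l r res : Int),
    lo0 ≤ l →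
    (∀ m, lo0 ≤ m → m ≤ r → pvFeasible nums k m = false) →
    houseRobber4_go nums k fuel l r res = res := by
  intro fuel
  induction fuel with
  | zero => intro l r res _ _; rfl
  | succ f ih =>
      intro l r res hl hno
      by_cases h : l ≤ r
      · have hb := PySem.Int.floordiv_two_mid_bounds (lo := l) (hi := r) h
        set m := PySem.Int.floordiv (l + r) 2 with hm
        have hf := hno m (le_trans hl hb.1) hb.2
        simp only [houseRobber4_go, if_pos h, pvCount_eq, ← hm]
        have hk : ¬ ((pvDpCount m nums 0 0) ≥ k) := by
          simpa [pvFeasible] using hf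
        rw [if_neg hk]
        exact ih (m + 1) r res (by omega) hno
      · simp [houseRobber4_go, if_neg h]

-- A's loop returns the least feasible m0 when l ≤ m0 ≤ r and nothing in [l, m0) is feasible
lemma pvA_least (nums : List Int) (k : Int) : ∀ (fuel : Nat) (l r res m0 : Int),
    r - l < (fuel : Int) → l ≤ m0 → m0 ≤ r →
    pvFeasible nums k m0 = true →
    (∀ m, l ≤ m → m < m0 → pvFeasible nums k m = false) →
    houseRobber4_go nums k fuel l r res = m0 := by
  intro fuel
  induction fuel with
  | zero => intro l r res m0 hfu h1 h2 _ _; omega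
  | succ f ih =>
      intro l r res m0 hfu h1 h2 hfe hno
      have h : l ≤ r := le_trans h1 h2
      have hb := PySem.Int.floordiv_two_mid_bounds (lo := l) (hi := r) h
      set m := PySem.Int.floordiv (l + r) 2 with hm
      simp only [houseRobber4_go, if_pos h, pvCount_eq, ← hm]
      by_cases hfm : pvFeasible nums k m = true
      · have hk : (pvDpCount m nums 0 0) ≥ k := by simpa [pvFeasible] using hfm
        rw [if_pos hk]
        have hm0m : m0 ≤ m := by
          by_contra hc
          have := hno m hb.1 (by omega)
          rw [this] at hfm; exact Bool.false_ne_true hfm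
        by_cases he : m0 ≤ m - 1
        · exact ih l (m - 1) m m0 (by omega) h1 he hfe hno
        · have heq : m0 = m := by omega
          have hres := pvA_none nums k l f l (m - 1) m le_rfl
            (fun x hx1 hx2 => hno x hx1 (by omega))
          rw [hres]; omega
      · have hk : ¬ ((pvDpCount m nums 0 0) ≥ k) := by simpa [pvFeasible] using hfm
        rw [if_neg hk]
        have hmm0 : m < m0 := by
          by_contra hc
          exact hfm (pvFeasible_mono nums k m0 m (by omega) hfe)
        refine ih (m + 1) r res m0 (by omega) (by omega) h2 hfe ?_
        intro x hx hx2; exact hno x (by omega) hx2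

-- B's loop when nothing in [lo0, hi) is feasible: returns hi
lemma pvB_none (nums : List Int) (k lo0 : Int) : ∀ (fuel : Nat) (lo hi : Int),
    hi - lo ≤ (fuel : Int) → lo0 ≤ lo → lo ≤ hi →
    (∀ m, lo0 ≤ m → m < hi → pvFeasible nums k m = false) →
    houseRobber4_alt_go nums k lo hi = hi := by
  intro fuel
  induction fuel with
  | zero =>
      intro lo hi hfu _ hle _
      have : lo = hi := by omega
      rw [houseRobber4_alt_go, dif_neg (by omega : ¬ lo < hi), this]
  | succ f ih =>
      intro lo hi hfu hl0 hle hno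
      by_cases h : lo < hi
      · have hb := pvMid_bounds lo hi h
        rw [houseRobber4_alt_go, dif_pos h]
        rw [if_neg (by rw [hno _ (le_trans hl0 hb.1) hb.2]; exact Bool.false_ne_true)]
        exact ih _ hi (by omega) (by omega) (by omega) hno
      · rw [houseRobber4_alt_go, dif_neg h]; omega

-- B's loop returns the least feasible m0 in [lo, hi)
lemma pvB_least (nums : List Int) (k : Int) : ∀ (fuel : Nat) (lo hi m0 : Int),
    hi - lo ≤ (fuel : Int) → lo ≤ m0 → m0 < hi →
    pvFeasible nums k m0 = true →
    (∀ m, lo ≤ m → m < m0 → pvFeasible nums k m = false) →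
    houseRobber4_alt_go nums k lo hi = m0 := by
  intro fuel
  induction fuel with
  | zero => intro lo hi m0 hfu h1 h2 _ _; omega
  | succ f ih =>
      intro lo hi m0 hfu h1 h2 hfe hno
      have h : lo < hi := by omega
      have hb := pvMid_bounds lo hi h
      set m := PySem.Int.floordiv (lo + hi) 2 with hm
      rw [houseRobber4_alt_go, dif_pos h, ← hm]
      by_cases hfm : pvFeasible nums k m = true
      · rw [if_pos hfm]
        have hm0m : m0 ≤ m := by
          by_contra hc
          have := hno m hb.1 (by omega)
          rw [this] at hfm; exact Bool.false_ne_true hfm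
        by_cases he : m0 < m
        · exact ih lo m m0 (by omega) h1 he hfe hno
        · have heq : m0 = m := by omega
          have hres := pvB_none nums k lo f lo m (by omega) le_rfl (by omega)
            (fun x hx1 hx2 => hno x hx1 (by omega))
          rw [hres]; omega
      · rw [if_neg hfm]
        have hmm0 : m < m0 := by
          by_contra hc
          exact hfm (pvFeasible_mono nums k m0 m (by omega) hfe)
        refine ih (m + 1) hi m0 (by omega) (by omega) h2 hfe ?_
        intro x hx hx2; exact hno x (by omega) hx2

-- ===== VERDICT (by name: the statement is the Claim_ definition above) =====
theorem houseRobber4_spec : Claim_equal_houseRobber4 := by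
  intro nums k _
  unfold Spec_houseRobber4 houseRobber4 houseRobber4_alt
  by_cases hf : pvFeasible nums k 1000000000 = true
  · -- a feasible threshold exists in range; take the least feasible m0 ≥ 0
    obtain ⟨m0, hm0, hleast⟩ := Int.exists_least_of_bdd
      (P := fun m => 0 ≤ m ∧ pvFeasible nums k m = true)
      ⟨0, fun z hz => hz.1⟩ ⟨1000000000, by norm_num, hf⟩
    have hub : m0 ≤ 1000000000 := hleast 1000000000 ⟨by norm_num, hf⟩
    have hno : ∀ m, 0 ≤ m → m < m0 → pvFeasible nums k m = false := by
      intro m hm hlt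
      by_contra hc
      have : pvFeasible nums k m = true := by
        cases hx : pvFeasible nums k m
        · exact absurd hx hc
        · rfl
      exact absurd (hleast m ⟨hm, this⟩) (by omega)
    rw [pvA_least nums k 1000000001 0 1000000000 1000000000 m0 (by norm_num) hm0.1 hub hm0.2 hno,
        pvB_least nums k 1000000002 0 1000000001 m0 (by norm_num) hm0.1 (by omega) hm0.2 hno]
    omega
  · -- nothing ≤ 10^9 is feasible
    have hno : ∀ m, m ≤ 1000000000 → pvFeasible nums k m = false := by
      intro m hm
      cases hx : pvFeasible nums k m
      · rfl
      · exact absurd (pvFeasible_mono nums k m 1000000000 hm hx) hf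
    rw [pvA_none nums k 0 1000000001 0 1000000000 1000000000 le_rfl (fun m _ h2 => hno m h2),
        pvB_none nums k 0 1000000002 0 1000000001 (by norm_num) le_rfl (by norm_num)
          (fun m h1 h2 => hno m (by omega))]
    norm_num
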